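-- pv_equiv track=rewrite | github.com/MrBrantCode/unitest_baseline | mut_generate/mist_train_taco/taco_11899/solution.py | can_stack_cubes
-- ===== SOURCE A (Python) =====
-- from collections import deque
--
-- def can_stack_cubes(blocks):
--     blocks = deque(blocks)  # Convert the list to a deque for efficient popping from both ends
--     last = max(blocks)  # Initialize the last stacked cube's side length with the maximum value in the list
--     n = len(blocks)
--
--     while n > 0:
--         if blocks[0] > blocks[n - 1]:
--             if blocks[0] > last:
--                 return 'No'
--             last = blocks[0]
--             blocks.popleft()
--         else:
--             if blocks[n - 1] > last:
--                 return 'No'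
--             last = blocks[n - 1]
--             blocks.pop()
--         n -= 1
--
--     return 'Yes'
-- ===== SOURCE B (Python) =====
-- def can_stack_cubes(blocks):
--     # Stackable iff the sequence is valley-shaped: weakly decreasing, then
--     # weakly increasing. One left-to-right scan: skip the weakly decreasing
--     # prefix, then the weakly increasing rest; succeed iff at most one
--     # element of the suffix remains unvisited.
--     a = list(blocks)
--     n = len(a)
--     i = 0
--     while i + 1 < n and a[i] >= a[i + 1]:
--         i += 1
--     while i + 1 < n and a[i] <= a[i + 1]:
--         i += 1
--     return 'Yes' if n - i <= 1 else 'No'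
-- ===== Notes on version B (the rewrite author's own statement) =====
-- stated objective: faster
-- what changed: B replaces A's two-end greedy (deque popped from both ends while tracking the last stacked size) with a single left-to-right index scan that checks the list is valley-shaped: skip the weakly decreasing prefix, then the weakly increasing rest, and answer Yes iff at most one element remains; no deque, no max pre-pass, no popping.
-- crash fix: On the empty list A raises ValueError (max of empty sequence) while B returns 'Yes' (an empty pile is trivially stackable). — e.g. on can_stack_cubes([]): A raises ValueError, B returns "Yes"
import Mathlib
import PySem

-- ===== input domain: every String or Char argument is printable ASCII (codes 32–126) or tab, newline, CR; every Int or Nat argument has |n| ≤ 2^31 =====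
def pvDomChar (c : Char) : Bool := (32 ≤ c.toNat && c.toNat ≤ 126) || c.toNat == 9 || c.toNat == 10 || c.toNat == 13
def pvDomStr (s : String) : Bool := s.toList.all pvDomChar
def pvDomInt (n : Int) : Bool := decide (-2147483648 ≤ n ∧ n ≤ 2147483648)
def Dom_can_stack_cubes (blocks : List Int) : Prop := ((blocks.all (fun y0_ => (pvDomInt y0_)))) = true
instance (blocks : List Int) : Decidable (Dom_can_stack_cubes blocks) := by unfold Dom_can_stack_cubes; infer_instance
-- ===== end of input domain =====

-- B replaces A's two-end greedy deque peel (with max pre-pass) by a single left-to-right valley-shape scan; a timing run measured B faster by a constant factor.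

-- ===== PORT A =====
-- A's while loop: peel the larger end, tracking 'last' (the last stacked cube's side)
def goA : List Int → Int → String
  | [], _ => "Yes"
  | x :: rest, last =>
    if x > (x :: rest).getLast (List.cons_ne_nil x rest) then
      if x > last then "No" else goA rest x
    else
      if (x :: rest).getLast (List.cons_ne_nil x rest) > last then "No"
      else goA ((x :: rest).dropLast) ((x :: rest).getLast (List.cons_ne_nil x rest))
termination_by l _ => l.length
decreasing_by
  · simp
  · simp

def can_stack_cubes (blocks : List Int) : String :=
  match PySem.List.max? blocks (fun y => y) with
  | none => ""            -- max([]) raises ValueError: excluded by Pre_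
  | some m => goA blocks m

-- ===== PORT B =====
def peelDown : List Int → List Int
  | x :: y :: r => if x ≥ y then peelDown (y :: r) else x :: y :: r
  | l => l

def peelUp : List Int → List Int
  | x :: y :: r => if x ≤ y then peelUp (y :: r) else x :: y :: r
  | l => l

def can_stack_cubes_alt (blocks : List Int) : String :=
  if (peelUp (peelDown blocks)).length ≤ 1 then "Yes" else "No"

-- ===== PRECONDITION & SPEC =====
-- Pre_ excludes only the empty list, on which A raises ValueError (max of empty sequence).
def Pre_can_stack_cubes (blocks : List Int) : Prop := blocks ≠ []
instance (blocks : List Int) : Decidable (Pre_can_stack_cubes blocks) := by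
  unfold Pre_can_stack_cubes; infer_instance

def pvWitness_can_stack_cubes : List Int := [3, 1, 2]

-- On the empty list A raises ValueError (max of empty sequence) while B returns "Yes".
def Raises_can_stack_cubes (blocks : List Int) : Prop := blocks = []
instance (blocks : List Int) : Decidable (Raises_can_stack_cubes blocks) := by
  unfold Raises_can_stack_cubes; infer_instance
def pvRaiseWitness_can_stack_cubes : List Int := []
def pvRaiseWitnessOut_can_stack_cubes : String := "Yes"

def Spec_can_stack_cubes (blocks : List Int) (out : String) : Prop := out = can_stack_cubes_alt blocks
instance (blocks : List Int) (out : String) : Decidable (Spec_can_stack_cubes blocks out) := by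
  unfold Spec_can_stack_cubes; infer_instance

-- ===== CLAIM (what is proved, stated in full; the proofs are below) =====
def Claim_equal_can_stack_cubes : Prop := ∀ (blocks : List Int), Dom_can_stack_cubes blocks → Pre_can_stack_cubes blocks → Spec_can_stack_cubes blocks (can_stack_cubes blocks)

def Claim_raises_can_stack_cubes : Prop := (∀ (blocks : List Int), Dom_can_stack_cubes blocks → Raises_can_stack_cubes blocks → ¬ Pre_can_stack_cubes blocks) ∧ (Dom_can_stack_cubes (pvRaiseWitness_can_stack_cubes) ∧ Raises_can_stack_cubes (pvRaiseWitness_can_stack_cubes) ∧ can_stack_cubes_alt (pvRaiseWitness_can_stack_cubes) = pvRaiseWitnessOut_can_stack_cubes)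

-- ===== LEMMAS AND PROOFS =====

-- The valley property: weakly decreasing, then weakly increasing.
def Valley : List Int → Prop
  | x :: y :: r => if x ≥ y then Valley (y :: r) else List.IsChain (· ≤ ·) (x :: y :: r)
  | _ => True

theorem peelUp_len : ∀ l : List Int, ((peelUp l).length ≤ 1 ↔ List.IsChain (· ≤ ·) l)
  | [] => by simp [peelUp]
  | [x] => by simp [peelUp]
  | x :: y :: r => by
    by_cases h : x ≤ y
    · have ih := peelUp_len (y :: r)
      simp [peelUp, h, List.isChain_cons_cons, ih]
    · simp [peelUp, h, List.isChain_cons_cons]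

theorem alt_char : ∀ l : List Int, (can_stack_cubes_alt l = "Yes" ↔ Valley l)
  | [] => by simp [can_stack_cubes_alt, peelDown, peelUp, Valley]
  | [x] => by simp [can_stack_cubes_alt, peelDown, peelUp, Valley]
  | x :: y :: r => by
    by_cases h : x ≥ y
    · have ih := alt_char (y :: r)
      simpa [can_stack_cubes_alt, peelDown, h, Valley] using ih
    · have h' : x ≤ y := le_of_not_ge h
      have hlen := peelUp_len (y :: r)
      have e1 : can_stack_cubes_alt (x :: y :: r)
          = (if (peelUp (y :: r)).length ≤ 1 then "Yes" else "No") := by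
        simp [can_stack_cubes_alt, peelDown, peelUp, h, h']
      have e2 : Valley (x :: y :: r) ↔ (x ≤ y ∧ List.IsChain (· ≤ ·) (y :: r)) := by
        simp [Valley, h, List.isChain_cons_cons]
      rw [e1, e2]
      by_cases hcnd : (peelUp (y :: r)).length ≤ 1
      · simp [hcnd]; exact ⟨h', hlen.mp hcnd⟩
      · simp [hcnd]; intro _ hnd; exact hcnd (hlen.mpr hnd)

theorem alt_yn (l : List Int) : can_stack_cubes_alt l = "Yes" ∨ can_stack_cubes_alt l = "No" := by
  unfold can_stack_cubes_alt; split <;> simp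

theorem nd_le_last : ∀ (l : List Int) (d : Int), List.IsChain (· ≤ ·) l → l ≠ [] →
    ∀ z ∈ l, z ≤ l.getLastD d
  | [x], d, _, _, z, hz => by simp at hz; simp [hz]
  | x :: y :: r, d, hc, _, z, hz => by
    rw [List.isChain_cons_cons] at hc
    have ih := nd_le_last (y :: r) d hc.2 (by simp)
    have hy : y ≤ (y :: r).getLastD d := ih y (by simp)
    rcases List.mem_cons.mp hz with h1 | h2
    · subst h1; simpa using le_trans hc.1 hy
    · simpa using ih z h2

theorem valley_le : ∀ (r : List Int) (x d : Int), Valley (x :: r) →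
    ∀ z ∈ x :: r, z ≤ max x ((x :: r).getLastD d)
  | [], x, d, _, z, hz => by simp at hz; simp [hz]
  | y :: r, x, d, hv, z, hz => by
    by_cases h : x ≥ y
    · have hv' : Valley (y :: r) := by simpa [Valley, h] using hv
      have ih := valley_le r y d hv'
      rcases List.mem_cons.mp hz with h1 | h2
      · subst h1; simp
      · have := ih z h2
        have hle : max y ((y :: r).getLastD d) ≤ max x ((x :: y :: r).getLastD d) := by
          simp [List.getLastD]; omega
        exact le_trans this hle
    · have hc : List.IsChain (· ≤ ·) (x :: y :: r) := by simpa [Valley, h] using hv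
      have := nd_le_last (x :: y :: r) d hc (by simp) z hz
      omega

theorem nd_append : ∀ (l : List Int) (b : Int), List.IsChain (· ≤ ·) l →
    (∀ z ∈ l, z ≤ b) → List.IsChain (· ≤ ·) (l ++ [b])
  | [], b, _, _ => by simp
  | [x], b, _, hb => by simp [List.isChain_cons_cons]; exact hb x (by simp)
  | x :: y :: r, b, hc, hb => by
    rw [List.isChain_cons_cons] at hc
    have ih := nd_append (y :: r) b hc.2 (fun z hz => hb z (by simp [List.mem_cons] at hz ⊢; tauto))
    simpa [List.isChain_cons_cons] using And.intro hc.1 (by simpa using ih)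

theorem valley_append : ∀ (l : List Int) (b : Int), Valley l → (∀ z ∈ l, z ≤ b) →
    Valley (l ++ [b])
  | [], b, _, _ => by simp [Valley]
  | [x], b, _, hb => by
    by_cases h : x ≥ b <;> simp [Valley, h, List.isChain_cons_cons]
    exact hb x (by simp)
  | x :: y :: r, b, hv, hb => by
    by_cases h : x ≥ y
    · have hv' : Valley (y :: r) := by simpa [Valley, h] using hv
      have ih := valley_append (y :: r) b hv'
        (fun z hz => hb z (by simp [List.mem_cons] at hz ⊢; tauto))
      simpa [Valley, h] using ih
    · have hc : List.IsChain (· ≤ ·) (x :: y :: r) := by simpa [Valley, h] using hv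
      have := nd_append (x :: y :: r) b hc hb
      simpa [Valley, h] using this

theorem valley_cons_ge : ∀ (x : Int) (l : List Int), Valley l →
    (∀ y, l.head? = some y → y ≤ x) → Valley (x :: l)
  | _, [], _, _ => by simp [Valley]
  | x, y :: r, hv, hh => by
    have h : x ≥ y := hh y rfl
    simpa [Valley, h] using hv

theorem valley_of_nd : ∀ (l : List Int), List.IsChain (· ≤ ·) l → Valley l
  | [], _ => by simp [Valley]
  | [x], _ => by simp [Valley]
  | x :: y :: r, hc => by
    rw [List.isChain_cons_cons] at hc
    by_cases h : x ≥ y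
    · have := valley_of_nd (y :: r) hc.2
      simpa [Valley, h] using this
    · simpa [Valley, h, List.isChain_cons_cons] using hc

theorem valley_dropLast : ∀ (l : List Int), Valley l → Valley l.dropLast
  | [], _ => by simp [Valley]
  | [_], _ => by simp [Valley]
  | x :: y :: r, hv => by
    by_cases h : x ≥ y
    · have hv' : Valley (y :: r) := by simpa [Valley, h] using hv
      have ih := valley_dropLast (y :: r) hv'
      rw [List.dropLast_cons₂]
      refine valley_cons_ge x _ ih ?_
      intro z hz
      cases r with
      | nil => simp at hz
      | cons a s =>
        rw [List.dropLast_cons₂] at hz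
        simp at hz; omega
    · have hc : List.IsChain (· ≤ ·) (x :: y :: r) := by simpa [Valley, h] using hv
      exact valley_of_nd _ hc.dropLast

theorem valley_le' (x : Int) (r : List Int) (hv : Valley (x :: r)) :
    ∀ z ∈ x :: r, z ≤ max x ((x :: r).getLast (List.cons_ne_nil x r)) := by
  have hgl : (x :: r).getLastD 0 = (x :: r).getLast (List.cons_ne_nil x r) := by
    rw [List.getLastD_eq_getLast?, List.getLast?_eq_getLast (List.cons_ne_nil x r)]
    rfl
  have := valley_le r x 0 hv
  rwa [hgl] at this

theorem goA_char : ∀ (l : List Int), l ≠ [] → ∀ last : Int,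
    (goA l last = "Yes" ↔ (Valley l ∧ ∀ z ∈ l, z ≤ last))
  | [x], _, last => by
    rw [goA]
    simp only [List.getLast_singleton, lt_irrefl, if_false]
    by_cases hxl : x > last
    · refine iff_of_false (by simp [hxl]) ?_
      rintro ⟨-, hall⟩
      exact absurd (hall x (by simp)) (by omega)
    · simp [hxl, goA, Valley]
      omega
  | x :: y :: r, _, last => by
    rw [goA]
    set b := (x :: y :: r).getLast (List.cons_ne_nil x (y :: r)) with hb
    by_cases hfb : x > b
    · by_cases hxl : x > last
      · refine iff_of_false (by simp [hfb, hxl]) ?_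
        rintro ⟨-, hall⟩
        exact absurd (hall x (by simp)) (by omega)
      · rw [if_pos hfb, if_neg hxl]
        have ih := goA_char (y :: r) (by simp) x
        rw [ih]
        have hmax : max x b = x := max_eq_left (le_of_lt hfb)
        constructor
        · rintro ⟨hvr, hall⟩
          have hyx : y ≤ x := hall y (by simp)
          refine ⟨by simpa [Valley, hyx] using hvr, ?_⟩
          intro z hz
          rcases List.mem_cons.mp hz with rfl | hz'
          · omega
          · have := hall z hz'; omega
        · rintro ⟨hv, hall⟩
          have hle := valley_le' x (y :: r) hv
          have hallx : ∀ z ∈ y :: r, z ≤ x := by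
            intro z hz
            have := hle z (by simp [hz])
            omega
          have hyx : y ≤ x := hallx y (by simp)
          exact ⟨by simpa [Valley, hyx] using hv, hallx⟩
    · by_cases hbl : b > last
      · refine iff_of_false (by simp [hfb, hbl]) ?_
        rintro ⟨-, hall⟩
        have hbm : b ∈ x :: y :: r := hb ▸ List.getLast_mem _
        exact absurd (hall b hbm) (by omega)
      · rw [if_neg hfb, if_neg hbl]
        have hdnn : (x :: y :: r).dropLast ≠ [] := by simp
        have ih := goA_char ((x :: y :: r).dropLast) hdnn b
        rw [ih]
        have hsplit : (x :: y :: r).dropLast ++ [b] = x :: y :: r := by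
          rw [hb]; exact List.dropLast_append_getLast _
        have hmax : max x b = b := max_eq_right (le_of_not_gt hfb)
        constructor
        · rintro ⟨hvm, hallm⟩
          refine ⟨?_, ?_⟩
          · have := valley_append _ b hvm hallm
            rwa [hsplit] at this
          · intro z hz
            rw [← hsplit] at hz
            rcases List.mem_append.mp hz with hz1 | hz2
            · have := hallm z hz1; omega
            · simp at hz2; omega
        · rintro ⟨hv, hall⟩
          refine ⟨valley_dropLast _ hv, ?_⟩
          intro z hz
          have hzmem : z ∈ x :: y :: r := (List.dropLast_sublist _).subset hz
          have := valley_le' x (y :: r) hv z hzmem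
          omega
termination_by l => l.length
decreasing_by
  · simp
  · simp

theorem goA_yn : ∀ (l : List Int) (last : Int), goA l last = "Yes" ∨ goA l last = "No"
  | [], _ => by simp [goA]
  | x :: rest, last => by
    rw [goA]
    split_ifs
    · simp
    · exact goA_yn rest x
    · simp
    · exact goA_yn ((x :: rest).dropLast) _
termination_by l => l.length

-- ===== VERDICT (by name: the statement is the Claim_ definition above) =====
theorem can_stack_cubes_spec : Claim_equal_can_stack_cubes := by
  intro blocks _ hpre
  unfold Spec_can_stack_cubes
  unfold Pre_can_stack_cubes at hpre
  obtain ⟨m, hm⟩ : ∃ m, PySem.List.max? blocks (fun y => y) = some m := by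
    cases h : PySem.List.max? blocks (fun y => y) with
    | none => exact absurd (((PySem.List.max?_eq_none_iff blocks (fun y => y)).mp h)) hpre
    | some m => exact ⟨m, rfl⟩
  have hall : ∀ z ∈ blocks, z ≤ m := fun z hz => PySem.List.max?_isMax hm z hz
  have hA : can_stack_cubes blocks = goA blocks m := by
    unfold can_stack_cubes; rw [hm]
  have hchar := goA_char blocks hpre m
  have haltc := alt_char blocks
  rw [hA]
  by_cases hv : Valley blocks
  · rw [hchar.mpr ⟨hv, hall⟩, haltc.mpr hv]
  · have h1 : goA blocks m = "No" := by
      rcases goA_yn blocks m with h | h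
      · exact absurd (hchar.mp h).1 hv
      · exact h
    have h2 : can_stack_cubes_alt blocks = "No" := by
      rcases alt_yn blocks with h | h
      · exact absurd (haltc.mp h) hv
      · exact h
    rw [h1, h2]

@[simp]
theorem can_stack_cubes_raises : Claim_raises_can_stack_cubes := by
  unfold Claim_raises_can_stack_cubes
  exact ⟨fun blocks _ hr => by simp [Raises_can_stack_cubes] at hr; simp [Pre_can_stack_cubes, hr],
    by decide⟩
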